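-- pv_equiv track=rewrite | github.com/prostlizok/python_labs_km14_mandryko | p9_mandryko/p9_mandryko_1.py | mat_multiply
-- ===== SOURCE A (Python) =====
-- def inversion(tuple_i):
--     inv_num = 0
--     for i in range(len(tuple_i) - 1):
--         for j in range(i + 1, len(tuple_i)):
--             if tuple_i[i] > tuple_i[j]:
--                 inv_num += 1
--     return inv_num
--
-- def mat_multiply(indexs, list11):
--     """
--     The function multiplies numbers depending on calculated num of inversions
--     """
--     res_i = 1
--     results = []
--     for tuple_i, tuple_a in zip(indexs, list11):
--         inv = inversion(tuple_i)
--         #multiply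
--         if inv%2 == 0 or inv == 0:
--             for i in tuple_a:
--                 res_i = res_i * i
--             results.append(res_i)
--             res_i = 1
--         elif inv%2 != 0:
--             for i in tuple_a:
--                 res_i = res_i * i
--             results.append(res_i*(-1))
--             res_i = 1
--     return results
-- ===== SOURCE B (Python) =====
-- def _sort_count(a):
--     # merge sort returning (sorted list, inversion count)
--     n = len(a)
--     if n <= 1:
--         return a, 0
--     mid = n // 2
--     left, cl = _sort_count(a[:mid])
--     right, cr = _sort_count(a[mid:])
--     merged = []
--     i = j = 0
--     cross = 0
--     while i < len(left) and j < len(right):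
--         if left[i] <= right[j]:
--             merged.append(left[i]); i += 1
--         else:
--             merged.append(right[j]); j += 1; cross += len(left) - i
--     merged.extend(left[i:])
--     merged.extend(right[j:])
--     return merged, cl + cr + cross
--
-- def mat_multiply(indexs, list11):
--     """
--     The function multiplies numbers depending on calculated num of inversions
--     """
--     results = []
--     for tuple_i, tuple_a in zip(indexs, list11):
--         _, inv = _sort_count(list(tuple_i))
--         p = 1
--         for v in tuple_a:
--             p *= v
--         results.append(-p if inv % 2 else p)
--     return results
-- ===== Notes on version B (the rewrite author's own statement) =====
-- stated objective: faster
-- what changed: Replaces A's O(n^2) nested index-pair inversion counter with a merge-sort that counts inversions during merging, and replaces A's stateful fold with a reset accumulator by a direct map over the zipped rows.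
import Mathlib
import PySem

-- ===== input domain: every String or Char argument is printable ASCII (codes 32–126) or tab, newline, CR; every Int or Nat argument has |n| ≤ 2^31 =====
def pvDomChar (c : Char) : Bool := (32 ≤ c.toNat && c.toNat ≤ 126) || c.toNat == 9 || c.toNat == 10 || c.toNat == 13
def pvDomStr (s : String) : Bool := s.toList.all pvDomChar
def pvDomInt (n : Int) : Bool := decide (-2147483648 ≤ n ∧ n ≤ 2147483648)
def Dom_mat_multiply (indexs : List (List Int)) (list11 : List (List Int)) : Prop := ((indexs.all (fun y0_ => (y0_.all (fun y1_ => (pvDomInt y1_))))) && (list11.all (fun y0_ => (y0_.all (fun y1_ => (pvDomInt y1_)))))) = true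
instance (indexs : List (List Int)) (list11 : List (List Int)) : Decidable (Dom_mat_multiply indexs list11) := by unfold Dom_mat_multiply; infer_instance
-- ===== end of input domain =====

-- B replaces A's O(n^2) nested-index inversion count by a merge-sort inversion count (O(n log n) per row) and a direct map over the zipped rows; return value only, no mutation.

-- ===== PORT A =====
-- literal port of A's helper `inversion`
def inversion_pv (tuple_i : List Int) : Int :=
  (PySem.List.pyRange 0 ((tuple_i.length : Int) - 1) 1).foldl (fun inv_num i =>
    (PySem.List.pyRange (i + 1) (tuple_i.length : Int) 1).foldl (fun inv_num j =>
      if PySem.List.pyGetD tuple_i i 0 > PySem.List.pyGetD tuple_i j 0 then inv_num + 1 else inv_num)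
      inv_num) 0

def mat_multiply (indexs : List (List Int)) (list11 : List (List Int)) : List Int :=
  ((List.zip indexs list11).foldl (fun (st : Int × List Int) tp =>
    let inv := inversion_pv tp.1
    if PySem.Int.mod inv 2 = 0 ∨ inv = 0 then
      (1, st.2 ++ [tp.2.foldl (fun r v => r * v) st.1])
    else if PySem.Int.mod inv 2 ≠ 0 then
      (1, st.2 ++ [tp.2.foldl (fun r v => r * v) st.1 * (-1)])
    else st) ((1 : Int), ([] : List Int))).2

-- ===== PORT B =====
-- merge step of B's `_sort_count`: merged list and the cross-inversion count
def mergeCount : List Int → List Int → List Int × Int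
  | [], r => (r, 0)
  | l, [] => (l, 0)
  | x :: l, y :: r =>
    if x ≤ y then
      let p := mergeCount l (y :: r)
      (x :: p.1, p.2)
    else
      let p := mergeCount (x :: l) r
      (y :: p.1, p.2 + ((x :: l).length : Int))
termination_by l r => l.length + r.length

-- B's `_sort_count`: merge sort returning (sorted list, inversion count)
def sortCount (a : List Int) : List Int × Int :=
  if _h : a.length ≤ 1 then (a, 0)
  else
    let mid := a.length / 2
    let p1 := sortCount (a.take mid)
    let p2 := sortCount (a.drop mid)
    let p3 := mergeCount p1.1 p2.1
    (p3.1, p1.2 + p2.2 + p3.2)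
termination_by a.length
decreasing_by
  · simp [List.length_take]; omega
  · simp [List.length_drop]; omega

def mat_multiply_alt (indexs : List (List Int)) (list11 : List (List Int)) : List Int :=
  (List.zip indexs list11).map (fun tp =>
    let inv := (sortCount tp.1).2
    let p := tp.2.foldl (fun r v => r * v) 1
    if PySem.Int.mod inv 2 ≠ 0 then -p else p)

-- ===== PRECONDITION & SPEC =====
def Spec_mat_multiply (indexs : List (List Int)) (list11 : List (List Int)) (out : List Int) : Prop := out = mat_multiply_alt indexs list11
instance (indexs : List (List Int)) (list11 : List (List Int)) (out : List Int) : Decidable (Spec_mat_multiply indexs list11 out) := by unfold Spec_mat_multiply; infer_instance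

-- ===== CLAIM (what is proved, stated in full; the proofs are below) =====
def Claim_equal_mat_multiply : Prop := ∀ (indexs : List (List Int)) (list11 : List (List Int)), Dom_mat_multiply indexs list11 → Spec_mat_multiply indexs list11 (mat_multiply indexs list11)

-- ===== LEMMAS AND PROOFS =====

-- reference inversion count: pairs i < j with a[i] > a[j], head-structural form
def invN : List Int → Nat
  | [] => 0
  | x :: t => t.countP (fun y => decide (y < x)) + invN t

-- cross inversions between two blocks: pairs (x from L, y from R) with x > y
def crossN (L R : List Int) : Nat :=
  (L.map (fun x => R.countP (fun y => decide (y < x)))).sum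

lemma invN_short (a : List Int) (h : a.length ≤ 1) : invN a = 0 := by
  match a, h with
  | [], _ => rfl
  | [x], _ => rfl

lemma invN_append (L R : List Int) : invN (L ++ R) = invN L + invN R + crossN L R := by
  induction L with
  | nil => simp [invN, crossN]
  | cons x l ih =>
    simp [invN, crossN, List.countP_append] at *
    omega

lemma crossN_perm (L L' R R' : List Int) (hL : L.Perm L') (hR : R.Perm R') :
    crossN L R = crossN L' R' := by
  unfold crossN
  have h1 : ∀ x : Int, R.countP (fun y => decide (y < x)) = R'.countP (fun y => decide (y < x)) :=
    fun x => hR.countP_eq _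
  calc (L.map (fun x => R.countP (fun y => decide (y < x)))).sum
      = (L.map (fun x => R'.countP (fun y => decide (y < x)))).sum := by
        simp only [h1]
    _ = (L'.map (fun x => R'.countP (fun y => decide (y < x)))).sum :=
        (hL.map _).sum_eq

lemma mergeCount_perm (L R : List Int) : (mergeCount L R).1.Perm (L ++ R) := by
  fun_induction mergeCount L R with
  | case1 r => simp
  | case2 l h => simp
  | case3 x l y r hle p ih =>
    simpa [p] using ih.cons x
  | case4 x l y r hle p ih =>
    have hstep : (y :: ((x :: l) ++ r)).Perm (x :: (l ++ y :: r)) := by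
      simp only [List.cons_append]
      exact (List.Perm.swap x y (l ++ r)).trans (List.perm_middle.symm.cons x)
    simpa [p] using (ih.cons y).trans hstep

lemma mergeCount_sorted (L R : List Int) (hL : L.Pairwise (· ≤ ·)) (hR : R.Pairwise (· ≤ ·)) :
    (mergeCount L R).1.Pairwise (· ≤ ·) := by
  fun_induction mergeCount L R with
  | case1 r => simpa using hR
  | case2 l h => simpa using hL
  | case3 x l y r hle p ih =>
    have hl := (List.pairwise_cons.mp hL).2
    have hrest := ih hl hR
    refine List.pairwise_cons.mpr ⟨?_, by simpa [p] using hrest⟩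
    intro z hz
    have hz' : z ∈ l ++ (y :: r) := (mergeCount_perm l (y :: r)).subset (by simpa [p] using hz)
    rcases List.mem_append.mp hz' with h1 | h1
    · exact (List.pairwise_cons.mp hL).1 z h1
    · rcases List.mem_cons.mp h1 with rfl | h2
      · exact hle
      · exact le_trans hle ((List.pairwise_cons.mp hR).1 z h2)
  | case4 x l y r hle p ih =>
    have hr := (List.pairwise_cons.mp hR).2
    have hrest := ih hL hr
    refine List.pairwise_cons.mpr ⟨?_, by simpa [p] using hrest⟩
    intro z hz
    have hz' : z ∈ (x :: l) ++ r := (mergeCount_perm (x :: l) r).subset (by simpa [p] using hz)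
    have hyx : y ≤ x := le_of_lt (lt_of_not_ge hle)
    rcases List.mem_append.mp hz' with h1 | h1
    · rcases List.mem_cons.mp h1 with rfl | h2
      · exact hyx
      · exact le_trans hyx ((List.pairwise_cons.mp hL).1 z h2)
    · exact (List.pairwise_cons.mp hR).1 z h1

lemma crossN_cons_right (L : List Int) (y : Int) (R : List Int) :
    crossN L (y :: R) = L.countP (fun x => decide (y < x)) + crossN L R := by
  induction L with
  | nil => simp [crossN]
  | cons x l ih =>
    simp only [crossN, List.map_cons, List.sum_cons, List.countP_cons] at *
    by_cases hyx : y < x <;> simp only [hyx, decide_true, decide_false, if_true] <;> omega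

lemma mergeCount_count (L R : List Int) (hL : L.Pairwise (· ≤ ·)) (hR : R.Pairwise (· ≤ ·)) :
    (mergeCount L R).2 = (crossN L R : Int) := by
  fun_induction mergeCount L R with
  | case1 r => simp [crossN]
  | case2 l h => simp [crossN]
  | case3 x l y r hle p ih =>
    have hl := (List.pairwise_cons.mp hL).2
    have h0 : (y :: r).countP (fun z => decide (z < x)) = 0 := by
      rw [List.countP_eq_zero]
      intro z hz
      rcases List.mem_cons.mp hz with rfl | h2
      · simpa using not_lt.mpr hle
      · have := (List.pairwise_cons.mp hR).1 z h2
        simpa using not_lt.mpr (le_trans hle this)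
    have hthis : crossN (x :: l) (y :: r) = crossN l (y :: r) := by
      simp [crossN, h0]
    rw [hthis, ← ih hl hR]
  | case4 x l y r hle p ih =>
    have hr := (List.pairwise_cons.mp hR).2
    have hxy : y < x := lt_of_not_ge hle
    have hall : (x :: l).countP (fun z => decide (y < z)) = (x :: l).length := by
      rw [List.countP_eq_length]
      intro z hz
      rcases List.mem_cons.mp hz with rfl | h2
      · simpa using hxy
      · have := (List.pairwise_cons.mp hL).1 z h2
        simpa using lt_of_lt_of_le hxy this
    have hc := ih hL hr
    rw [crossN_cons_right, hall]
    simp only [p] at hc ⊢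
    rw [hc]
    push_cast
    ring

lemma sortCount_spec : ∀ (n : Nat) (a : List Int), a.length ≤ n →
    (sortCount a).1.Perm a ∧ (sortCount a).1.Pairwise (· ≤ ·) ∧ (sortCount a).2 = (invN a : Int) := by
  intro n
  induction n with
  | zero =>
    intro a h
    have : a = [] := List.length_eq_zero_iff.mp (Nat.le_zero.mp h)
    subst this
    simp [sortCount, invN]
  | succ n ih =>
    intro a h
    by_cases h1 : a.length ≤ 1
    · have heq : sortCount a = (a, 0) := by rw [sortCount]; simp [h1]
      rw [heq]
      refine ⟨List.Perm.refl a, ?_, by simp [invN_short a h1]⟩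
      match a, h1 with
      | [], _ => exact List.Pairwise.nil
      | [x], _ => simp
    · rw [sortCount]
      simp only [h1, dif_neg, not_false_iff]
      have hlen : 2 ≤ a.length := by omega
      have hmid1 : (a.take (a.length / 2)).length ≤ n := by
        simp [List.length_take]; omega
      have hmid2 : (a.drop (a.length / 2)).length ≤ n := by
        simp [List.length_drop]; omega
      obtain ⟨hp1, hs1, hc1⟩ := ih _ hmid1
      obtain ⟨hp2, hs2, hc2⟩ := ih _ hmid2
      set L := (sortCount (a.take (a.length / 2))).1 with hLdef
      set R := (sortCount (a.drop (a.length / 2))).1 with hRdef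
      have hperm : (mergeCount L R).1.Perm a := by
        refine (mergeCount_perm L R).trans ?_
        have := (hp1.append hp2)
        simpa [List.take_append_drop] using this
      refine ⟨hperm, mergeCount_sorted L R hs1 hs2, ?_⟩
      have hinv : invN a = invN (a.take (a.length / 2)) + invN (a.drop (a.length / 2))
          + crossN (a.take (a.length / 2)) (a.drop (a.length / 2)) := by
        conv_lhs => rw [← List.take_append_drop (a.length / 2) a]
        exact invN_append _ _
      have hcross : (mergeCount L R).2 =
          (crossN (a.take (a.length / 2)) (a.drop (a.length / 2)) : Int) := by
        rw [mergeCount_count L R hs1 hs2, crossN_perm L _ R _ hp1 hp2]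
      rw [hc1, hc2, hcross, hinv]
      push_cast
      ring

-- A's index loops compute invN of the corresponding suffix
lemma aLoop (t : List Int) : ∀ (n k : Nat) (acc : Int), t.length - k ≤ n →
    (PySem.List.pyRange (k : Int) ((t.length : Int) - 1) 1).foldl (fun inv_num i =>
      (PySem.List.pyRange (i + 1) (t.length : Int) 1).foldl (fun inv_num j =>
        if PySem.List.pyGetD t i 0 > PySem.List.pyGetD t j 0 then inv_num + 1 else inv_num)
        inv_num) acc
    = acc + (invN (t.drop k) : Int) := by
  intro n
  induction n with
  | zero =>
    intro k acc h
    have hk : t.length ≤ k := by omega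
    rw [PySem.List.pyRange_one_eq_nil (by omega : (t.length : Int) - 1 ≤ (k : Int))]
    simp [List.drop_eq_nil_of_le hk, invN]
  | succ n ih =>
    intro k acc h
    by_cases hk : (t.length : Int) - 1 ≤ (k : Int)
    · rw [PySem.List.pyRange_one_eq_nil hk]
      have : (t.drop k).length ≤ 1 := by simp [List.length_drop]; omega
      simp [invN_short _ this]
    · have hklt : k + 1 < t.length := by omega
      rw [PySem.List.pyRange_one_cons (by omega : (k : Int) < (t.length : Int) - 1)]
      rw [List.foldl_cons]
      have hcast : (k : Int) + 1 = ((k + 1 : Nat) : Int) := by push_cast; ring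
      -- inner loop: fold over the suffix after index k
      have hinner : ∀ (b : Int),
          (PySem.List.pyRange ((k : Int) + 1) (t.length : Int) 1).foldl (fun inv_num j =>
            if PySem.List.pyGetD t (k : Int) 0 > PySem.List.pyGetD t j 0 then inv_num + 1 else inv_num) b
          = b + ((t.drop (k + 1)).countP (fun y => decide (PySem.List.pyGetD t (k : Int) 0 > y)) : Int) := by
        intro b
        rw [hcast]
        rw [PySem.List.foldl_pyRange_pyGetD' t 0
          (fun inv_num v => if PySem.List.pyGetD t (k : Int) 0 > v then inv_num + 1 else inv_num)
          b (a := ((k + 1 : Nat) : Int)) (by positivity)]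
        simp only [Int.toNat_natCast]
        exact PySem.List.foldl_ite_add_one _ _ _
      rw [hinner]
      have hkd : PySem.List.pyGetD t (k : Int) 0 = t[k]'(by omega) := by
        rw [PySem.List.pyGetD_natCast]
        exact List.getD_eq_getElem t 0 (by omega)
      have hdrop : t.drop k = t[k]'(by omega) :: t.drop (k + 1) :=
        List.drop_eq_getElem_cons (by omega)
      rw [hcast, ih (k + 1) _ (by omega)]
      rw [hdrop]
      simp only [invN, hkd]
      push_cast
      ring

lemma inversion_eq_sortCount (t : List Int) : inversion_pv t = (sortCount t).2 := by
  have h1 : inversion_pv t = (invN t : Int) := by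
    unfold inversion_pv
    have := aLoop t t.length 0 0 (by omega)
    simpa using this
  have h2 := (sortCount_spec t.length t (le_refl _)).2.2
  rw [h1, h2]

lemma fold_eq_map (z : List (List Int × List Int)) : ∀ (acc : List Int),
    (z.foldl (fun (st : Int × List Int) tp =>
      let inv := inversion_pv tp.1
      if PySem.Int.mod inv 2 = 0 ∨ inv = 0 then
        (1, st.2 ++ [tp.2.foldl (fun r v => r * v) st.1])
      else if PySem.Int.mod inv 2 ≠ 0 then
        (1, st.2 ++ [tp.2.foldl (fun r v => r * v) st.1 * (-1)])
      else st) ((1 : Int), acc)).2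
    = acc ++ z.map (fun tp =>
        let inv := (sortCount tp.1).2
        let p := tp.2.foldl (fun r v => r * v) 1
        if PySem.Int.mod inv 2 ≠ 0 then -p else p) := by
  induction z with
  | nil => intro acc; simp
  | cons tp z ih =>
    intro acc
    rw [List.foldl_cons, List.map_cons]
    simp only []
    rw [inversion_eq_sortCount tp.1]
    split_ifs with h1 h2 h2
    · -- mod = 0 (from h1) but h2 : mod ≠ 0 : contradiction
      exfalso
      rcases h1 with h | h
      · exact h2 h
      · exact h2 (by rw [h]; decide)
    · rw [ih]
      simp
    · rw [ih]
      simp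
    · exact absurd (Or.inl (not_not.mp h2)) h1

-- ===== VERDICT (by name: the statement is the Claim_ definition above) =====
theorem mat_multiply_spec : Claim_equal_mat_multiply := by
  intro indexs list11 _
  unfold Spec_mat_multiply mat_multiply mat_multiply_alt
  simpa using fold_eq_map (List.zip indexs list11) []
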